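-- pv_equiv track=rewrite | github.com/melhamamsy/chest-xray-diagnosis-and-report | utils/utils.py | count_ab_categories
-- ===== SOURCE A (Python) =====
-- def count_ab_categories(sublists, category_a, category_b):
--     """
--     """
--     a = 0
--     b = 0
--     a_b = 0
--     n_ab = 0
--
--     for sublist in sublists:
--         if category_a in sublist and category_b in sublist:
--             a_b += 1
--         elif category_a in sublist:
--             a += 1
--         elif category_b in sublist:
--             b += 1
--         else:
--             n_ab += 1
--
--     return {
--         f"{category_a}": a,
--         f"{category_b}": b,
--         f"{category_a} & {category_b}": a_b,
--         "Neither": n_ab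
--     }
-- ===== SOURCE B (Python) =====
-- def count_ab_categories(sublists, category_a, category_b):
--     # Map each sublist to its (in_a, in_b) classification tag once,
--     # then read the four cells off the tag list with .count (no accumulator loop).
--     tags = [(category_a in sublist, category_b in sublist) for sublist in sublists]
--     return {
--         f"{category_a}": tags.count((True, False)),
--         f"{category_b}": tags.count((False, True)),
--         f"{category_a} & {category_b}": tags.count((True, True)),
--         "Neither": tags.count((False, False)),
--     }
-- ===== Notes on version B (the rewrite author's own statement) =====
-- stated objective: alternative
-- what changed: B replaces A's single-pass loop with four mutually exclusive counters by a map-then-count scheme: it first builds a list of (in_a, in_b) boolean tags, then obtains each of the four cells with list.count on that tag list, with no accumulator at all.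
import Mathlib
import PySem

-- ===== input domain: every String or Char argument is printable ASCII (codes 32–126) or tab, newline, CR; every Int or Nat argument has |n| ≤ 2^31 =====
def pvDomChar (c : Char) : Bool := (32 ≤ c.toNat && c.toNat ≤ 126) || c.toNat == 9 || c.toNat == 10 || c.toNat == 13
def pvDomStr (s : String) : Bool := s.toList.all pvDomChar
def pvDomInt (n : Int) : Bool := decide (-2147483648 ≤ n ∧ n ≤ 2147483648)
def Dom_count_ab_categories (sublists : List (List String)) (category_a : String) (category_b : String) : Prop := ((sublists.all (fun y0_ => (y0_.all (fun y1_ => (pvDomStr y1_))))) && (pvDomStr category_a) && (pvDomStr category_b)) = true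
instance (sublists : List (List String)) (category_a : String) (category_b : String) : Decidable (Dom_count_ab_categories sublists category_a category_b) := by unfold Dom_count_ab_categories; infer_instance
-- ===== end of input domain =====

-- B replaces A's loop with four exclusive counters by map-then-count: it tags each
-- sublist with its (in_a, in_b) pair and reads the four cells with list.count (alternative decomposition, same cost).

-- ===== PORT A =====
-- for-loop over sublists with four mutually exclusive counters, then a dict literal
def count_ab_categories (sublists : List (List String)) (category_a : String) (category_b : String) : List (String × Int) :=
  let st := sublists.foldl (fun (s : Int × Int × Int × Int) sublist =>
    if sublist.contains category_a && sublist.contains category_b then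
      (s.1, s.2.1, s.2.2.1 + 1, s.2.2.2)
    else if sublist.contains category_a then
      (s.1 + 1, s.2.1, s.2.2.1, s.2.2.2)
    else if sublist.contains category_b then
      (s.1, s.2.1 + 1, s.2.2.1, s.2.2.2)
    else
      (s.1, s.2.1, s.2.2.1, s.2.2.2 + 1)) (0, 0, 0, 0)
  (((((PySem.Dict.empty.insert category_a st.1).insert category_b st.2.1).insert
      (category_a ++ " & " ++ category_b) st.2.2.1).insert "Neither" st.2.2.2) : PySem.Dict String Int).items

-- ===== PORT B =====
-- tag list built by a comprehension, four cells read with list.count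
def count_ab_categories_alt (sublists : List (List String)) (category_a : String) (category_b : String) : List (String × Int) :=
  let tags := sublists.map (fun sublist => (sublist.contains category_a, sublist.contains category_b))
  (((((PySem.Dict.empty.insert category_a ((tags.count (true, false) : Nat) : Int)).insert
      category_b ((tags.count (false, true) : Nat) : Int)).insert
      (category_a ++ " & " ++ category_b) ((tags.count (true, true) : Nat) : Int)).insert
      "Neither" ((tags.count (false, false) : Nat) : Int)) : PySem.Dict String Int).items

-- ===== PRECONDITION & SPEC =====
def Spec_count_ab_categories (sublists : List (List String)) (category_a : String) (category_b : String) (out : List (String × Int)) : Prop := out = count_ab_categories_alt sublists category_a category_b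
instance (sublists : List (List String)) (category_a : String) (category_b : String) (out : List (String × Int)) : Decidable (Spec_count_ab_categories sublists category_a category_b out) := by unfold Spec_count_ab_categories; infer_instance

-- ===== CLAIM (what is proved, stated in full; the proofs are below) =====
def Claim_equal_count_ab_categories : Prop := ∀ (sublists : List (List String)) (category_a : String) (category_b : String), Dom_count_ab_categories sublists category_a category_b → Spec_count_ab_categories sublists category_a category_b (count_ab_categories sublists category_a category_b)

-- ===== LEMMAS AND PROOFS =====

-- A's fold computes exactly the four tag counts of B's tag list
theorem fold_eq_counts (category_a category_b : String) (l : List (List String))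
    (sa : Int × Int × Int × Int) :
    l.foldl (fun (s : Int × Int × Int × Int) sublist =>
      if sublist.contains category_a && sublist.contains category_b then
        (s.1, s.2.1, s.2.2.1 + 1, s.2.2.2)
      else if sublist.contains category_a then
        (s.1 + 1, s.2.1, s.2.2.1, s.2.2.2)
      else if sublist.contains category_b then
        (s.1, s.2.1 + 1, s.2.2.1, s.2.2.2)
      else
        (s.1, s.2.1, s.2.2.1, s.2.2.2 + 1)) sa
    = (let tags := l.map (fun sublist => (sublist.contains category_a, sublist.contains category_b))
       (sa.1 + (tags.count (true, false) : Nat),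
        sa.2.1 + (tags.count (false, true) : Nat),
        sa.2.2.1 + (tags.count (true, true) : Nat),
        sa.2.2.2 + (tags.count (false, false) : Nat))) := by
  induction l generalizing sa with
  | nil => simp
  | cons x xs ih =>
    simp only [List.foldl_cons, List.map_cons]
    rw [ih]
    cases ha : x.contains category_a <;> cases hb : x.contains category_b <;>
      simp <;> omega

-- ===== VERDICT (by name: the statement is the Claim_ definition above) =====
theorem count_ab_categories_spec : Claim_equal_count_ab_categories := by
  intro sublists ca cb _
  unfold Spec_count_ab_categories count_ab_categories count_ab_categories_alt
  rw [fold_eq_counts]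
  simp
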